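-- pv_equiv track=rewrite | github.com/MajaMitreska/MacedonianHyphenate | utils.py | check_for_two_continuous_vowels
-- ===== SOURCE A (Python) =====
-- def check_for_two_continuous_vowels(letters_dict):
--     check = False
--     for i in range(len(letters_dict) - 1):
--         type_letter_1 = letters_dict[i][1]
--         type_letter_2 = letters_dict[i + 1][1]
--         if type_letter_1 == type_letter_2 == 'vowel':
--             check = True
--     return check
-- ===== SOURCE B (Python) =====
-- def check_for_two_continuous_vowels(letters_dict):
--     vowel_positions = {i for i, item in enumerate(letters_dict) if item[1] == 'vowel'}
--     return any(i + 1 in vowel_positions for i in vowel_positions)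
-- ===== Notes on version B (the rewrite author's own statement) =====
-- stated objective: alternative
-- what changed: B replaces A's index scan over adjacent pairs (a flag kept across the whole range loop) by building a set of vowel positions in one pass and then asking whether any position has its successor in the set.
import Mathlib
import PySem

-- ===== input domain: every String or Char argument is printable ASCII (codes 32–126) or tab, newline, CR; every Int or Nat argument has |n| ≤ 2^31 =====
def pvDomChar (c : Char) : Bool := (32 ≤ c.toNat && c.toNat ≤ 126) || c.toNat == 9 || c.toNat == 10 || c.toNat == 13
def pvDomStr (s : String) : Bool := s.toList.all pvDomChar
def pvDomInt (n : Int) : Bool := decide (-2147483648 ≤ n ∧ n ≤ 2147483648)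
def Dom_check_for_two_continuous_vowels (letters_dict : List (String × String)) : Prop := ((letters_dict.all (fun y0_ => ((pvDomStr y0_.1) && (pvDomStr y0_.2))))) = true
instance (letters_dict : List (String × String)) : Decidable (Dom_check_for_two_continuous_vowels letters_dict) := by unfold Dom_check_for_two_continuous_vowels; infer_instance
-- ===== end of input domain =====

-- B builds a set of vowel positions in one pass and then checks whether any position's successor is also in the set, instead of A's flag-carrying scan over adjacent index pairs (alternative decomposition, same cost).


-- ===== PORT A =====
-- indices i and i+1 are always in range (i < len-1), so pyGetD's default is never used
def check_for_two_continuous_vowels (letters_dict : List (String × String)) : Bool :=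
  (PySem.List.pyRange 0 ((letters_dict.length : Int) - 1) 1).foldl
    (fun check i =>
      if (PySem.List.pyGetD letters_dict i ("", "")).2 == (PySem.List.pyGetD letters_dict (i + 1) ("", "")).2
         && (PySem.List.pyGetD letters_dict (i + 1) ("", "")).2 == "vowel"
      then true else check)
    false

-- ===== PORT B =====
-- the set comprehension {i for i, item in enumerate(letters_dict) if item[1] == 'vowel'}
def pvVowelPositions (letters_dict : List (String × String)) : PySem.Set Int :=
  PySem.Set.ofList ((PySem.List.enumerate letters_dict).filterMap
    (fun p => if p.2.2 == "vowel" then some p.1 else none))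

-- any(i + 1 in vowel_positions for i in vowel_positions)
def check_for_two_continuous_vowels_alt (letters_dict : List (String × String)) : Bool :=
  (pvVowelPositions letters_dict).any
    (fun i => PySem.Set.contains (pvVowelPositions letters_dict) (i + 1))

-- ===== PRECONDITION & SPEC =====
def Spec_check_for_two_continuous_vowels (letters_dict : List (String × String)) (out : Bool) : Prop := out = check_for_two_continuous_vowels_alt letters_dict
instance (letters_dict : List (String × String)) (out : Bool) : Decidable (Spec_check_for_two_continuous_vowels letters_dict out) := by unfold Spec_check_for_two_continuous_vowels; infer_instance

-- ===== CLAIM (what is proved, stated in full; the proofs are below) =====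
def Claim_equal_check_for_two_continuous_vowels : Prop := ∀ (letters_dict : List (String × String)), Dom_check_for_two_continuous_vowels letters_dict → Spec_check_for_two_continuous_vowels letters_dict (check_for_two_continuous_vowels letters_dict)

-- ===== LEMMAS AND PROOFS =====

-- A's loop keeps a flag that is set whenever the condition fires: it computes `any`.
theorem pv_foldl_if_any (xs : List Int) (f : Int → Bool) (b : Bool) :
    xs.foldl (fun acc i => if f i then true else acc) b = (b || xs.any f) := by
  induction xs generalizing b with
  | nil => simp
  | cons x t ih =>
    simp only [List.foldl_cons, List.any_cons, ih]
    by_cases h : f x = true <;> simp [h]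

-- membership in the vowel-position list built from `enumerate`
theorem pv_mem_positions (letters_dict : List (String × String)) (s x : Int) :
    x ∈ (PySem.List.enumerate letters_dict s).filterMap
        (fun p => if p.2.2 == "vowel" then some p.1 else none)
      ↔ ∃ k : Nat, ∃ h : k < letters_dict.length,
          x = s + k ∧ letters_dict[k].2 = "vowel" := by
  induction letters_dict generalizing s with
  | nil => simp [PySem.List.enumerate_nil]
  | cons hd t ih =>
    rw [PySem.List.enumerate_cons]
    simp only [List.filterMap_cons]
    by_cases hv : hd.2 = "vowel"
    · simp only [hv, beq_self_eq_true, if_pos, List.mem_cons, ih]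
      constructor
      · rintro (rfl | ⟨k, hk, rfl, hv2⟩)
        · exact ⟨0, by simp, by simp, by simpa using hv⟩
        · exact ⟨k + 1, by simpa using hk, by push_cast; ring, by simpa using hv2⟩
      · rintro ⟨k, hk, rfl, hv2⟩
        cases k with
        | zero => left; simp
        | succ k =>
          right
          exact ⟨k, by simpa using hk, by push_cast; ring, by simpa using hv2⟩
    · rw [if_neg (by simpa using hv)]
      rw [ih]
      constructor
      · rintro ⟨k, hk, rfl, hv2⟩
        exact ⟨k + 1, by simpa using hk, by push_cast; ring, by simpa using hv2⟩
      · rintro ⟨k, hk, rfl, hv2⟩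
        cases k with
        | zero => exact absurd (by simpa using hv2) hv
        | succ k =>
          exact ⟨k, by simpa using hk, by push_cast; ring, by simpa using hv2⟩

theorem pv_A_iff (letters_dict : List (String × String)) :
    check_for_two_continuous_vowels letters_dict = true ↔
      ∃ k : Nat, ∃ h : k + 1 < letters_dict.length,
        letters_dict[k].2 = "vowel" ∧ letters_dict[k + 1].2 = "vowel" := by
  unfold check_for_two_continuous_vowels
  rw [pv_foldl_if_any]
  simp only [Bool.false_or, List.any_eq_true]
  constructor
  · rintro ⟨i, hi, hcond⟩
    rw [PySem.List.mem_pyRange_one] at hi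
    obtain ⟨h0, hlt⟩ := hi
    have hi1 : i < (letters_dict.length : Int) := by omega
    have hi2 : i + 1 < (letters_dict.length : Int) := by omega
    rw [PySem.List.pyGetD_eq_getElem letters_dict ("", "") h0 hi1,
        PySem.List.pyGetD_eq_getElem letters_dict ("", "") (by omega) hi2] at hcond
    simp only [Bool.and_eq_true, beq_iff_eq] at hcond
    have ht : (i + 1).toNat = i.toNat + 1 := by omega
    simp only [ht] at hcond
    exact ⟨i.toNat, by omega, hcond.1.trans hcond.2, hcond.2⟩
  · rintro ⟨k, hk, h1, h2⟩
    refine ⟨(k : Int), ?_, ?_⟩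
    · rw [PySem.List.mem_pyRange_one]; omega
    · rw [PySem.List.pyGetD_eq_getElem letters_dict ("", "") (by omega) (by omega),
          PySem.List.pyGetD_eq_getElem letters_dict ("", "") (by omega) (by omega)]
      have hk1 : ((k : Int) + 1).toNat = k + 1 := by omega
      have hk0 : ((k : Int)).toNat = k := by omega
      simp only [hk0, hk1]
      simp [h1, h2]

theorem pv_B_iff (letters_dict : List (String × String)) :
    check_for_two_continuous_vowels_alt letters_dict = true ↔
      ∃ k : Nat, ∃ h : k + 1 < letters_dict.length,
        letters_dict[k].2 = "vowel" ∧ letters_dict[k + 1].2 = "vowel" := by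
  unfold check_for_two_continuous_vowels_alt pvVowelPositions
  simp only [List.any_eq_true, PySem.Set.contains_iff, PySem.Set.mem_ofList,
    pv_mem_positions]
  constructor
  · rintro ⟨x, ⟨k, hk, rfl, hv1⟩, ⟨k', hk', heq, hv2⟩⟩
    have hkk : k' = k + 1 := by omega
    subst hkk
    exact ⟨k, by omega, hv1, hv2⟩
  · rintro ⟨k, hk, h1, h2⟩
    exact ⟨(k : Int), ⟨k, by omega, by simp, h1⟩, ⟨k + 1, by omega, by push_cast; ring, h2⟩⟩

-- ===== VERDICT (by name: the statement is the Claim_ definition above) =====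
theorem check_for_two_continuous_vowels_spec : Claim_equal_check_for_two_continuous_vowels := by
  intro letters_dict _
  unfold Spec_check_for_two_continuous_vowels
  have := (pv_A_iff letters_dict).trans (pv_B_iff letters_dict).symm
  cases hA : check_for_two_continuous_vowels letters_dict <;>
    cases hB : check_for_two_continuous_vowels_alt letters_dict <;>
      simp_all
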